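-- pv_equiv track=rewrite | github.com/clevertech/ml-stack-answers | ml_stack_answers/Extractors/SimpleLinearRegression/Posts/PostExtractor.py | mapAnswersToQuestions
-- ===== SOURCE A (Python) =====
-- def mapAnswersToQuestions(qa):
--     map = {} # { 'questionId': ['answerId', ...] }
--     for answerIndex in qa['answers']:
--         answer = qa['answers'][answerIndex]
--         if not answer['ParentId'] in map:
--             map[answer['ParentId']] = [answer['Id']]
--         else:
--             map[answer['ParentId']].append(answer['Id'])
--     return map
-- ===== SOURCE B (Python) =====
-- def mapAnswersToQuestions(qa):
--     answers = list(qa['answers'].values())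
--     parents = list(dict.fromkeys(a['ParentId'] for a in answers))
--     return {p: [a['Id'] for a in answers if a['ParentId'] == p] for p in parents}
-- ===== Notes on version B (the rewrite author's own statement) =====
-- stated objective: alternative
-- what changed: A builds the grouping incrementally in one pass, appending each answer Id into a dict keyed by ParentId; B first dedups the ParentIds in first-occurrence order (dict.fromkeys) and then builds each group with a separate filtering comprehension over the answer list.
-- outside the precondition, e.g. on mapAnswersToQuestions({'answers': {'0': {'Id': '7'}}}): A raises KeyError, B raises KeyError
import Mathlib
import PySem

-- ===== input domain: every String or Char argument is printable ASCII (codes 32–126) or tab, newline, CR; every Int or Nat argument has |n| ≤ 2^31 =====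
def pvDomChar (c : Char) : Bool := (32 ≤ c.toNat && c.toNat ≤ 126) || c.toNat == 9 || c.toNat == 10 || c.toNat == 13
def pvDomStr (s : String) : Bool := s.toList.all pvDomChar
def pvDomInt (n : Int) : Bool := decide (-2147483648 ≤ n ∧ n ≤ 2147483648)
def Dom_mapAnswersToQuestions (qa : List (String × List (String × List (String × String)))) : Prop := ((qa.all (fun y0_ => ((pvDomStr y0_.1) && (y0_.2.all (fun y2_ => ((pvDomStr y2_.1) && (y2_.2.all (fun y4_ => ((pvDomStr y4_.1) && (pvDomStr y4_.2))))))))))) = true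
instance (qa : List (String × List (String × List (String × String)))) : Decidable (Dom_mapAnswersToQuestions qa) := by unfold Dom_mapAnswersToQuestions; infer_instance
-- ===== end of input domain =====

-- B replaces A's incremental dict-of-lists loop by a two-phase grouping (ordered dedup of the
-- parent ids, then one filtering comprehension per parent): an alternative decomposition, not faster.

-- ===== PORT A =====
-- Literal port of A's single pass: iterate the keys of qa['answers'], look each answer up,
-- and either start or extend the parent's list.  The `getD _ ""` / `getD _ []` defaults are the
-- total forms of Python's `d[k]`; Pre_ excludes exactly the inputs where Python would raise KeyError.
def mapAnswersToQuestions (qa : List (String × List (String × List (String × String)))) : List (String × List String) :=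
  let answersD : PySem.Dict String (List (String × String)) :=
    PySem.Dict.ofList ((PySem.Dict.ofList qa).getD "answers" [])
  (answersD.keys.foldl (fun (m : PySem.Dict String (List String)) answerIndex =>
      let answer : PySem.Dict String String := PySem.Dict.ofList (answersD.getD answerIndex [])
      if m.contains (answer.getD "ParentId" "") = false then
        m.insert (answer.getD "ParentId" "") [answer.getD "Id" ""]
      else
        m.modify (answer.getD "ParentId" "") [] (fun l => l ++ [answer.getD "Id" ""]))
    PySem.Dict.empty).items

-- ===== PORT B =====
-- Port of Source B: collect the answer dicts (values), dedup the ParentIds in first-occurrence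
-- order (dict.fromkeys), then one filtering comprehension per parent.
def mapAnswersToQuestions_alt (qa : List (String × List (String × List (String × String)))) : List (String × List String) :=
  let answers : List (PySem.Dict String String) :=
    ((PySem.Dict.ofList ((PySem.Dict.ofList qa).getD "answers" [])).values).map PySem.Dict.ofList
  let parents : List String := PySem.List.dedup (answers.map (fun a => a.getD "ParentId" ""))
  parents.map (fun p =>
    (p, (answers.filter (fun a => a.getD "ParentId" "" == p)).map (fun a => a.getD "Id" "")))

-- ===== PRECONDITION & SPEC =====
-- Pre_ excludes exactly the inputs where Python A raises KeyError: qa must have an 'answers'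
-- key and every answer dict must have 'ParentId' and 'Id' keys.
def Pre_mapAnswersToQuestions (qa : List (String × List (String × List (String × String)))) : Prop :=
  (PySem.Dict.ofList qa).contains "answers" = true ∧
  ∀ p ∈ (PySem.Dict.ofList ((PySem.Dict.ofList qa).getD "answers" [])).items,
    (PySem.Dict.ofList p.2).contains "ParentId" = true ∧
    (PySem.Dict.ofList p.2).contains "Id" = true
instance (qa : List (String × List (String × List (String × String)))) : Decidable (Pre_mapAnswersToQuestions qa) := by unfold Pre_mapAnswersToQuestions; infer_instance

def pvWitness_mapAnswersToQuestions : (List (String × List (String × List (String × String)))) :=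
  [("answers", [("0", [("ParentId", "1"), ("Id", "7")]), ("1", [("ParentId", "1"), ("Id", "8")]), ("2", [("ParentId", "2"), ("Id", "9")])])]

def Spec_mapAnswersToQuestions (qa : List (String × List (String × List (String × String)))) (out : List (String × List String)) : Prop := out = mapAnswersToQuestions_alt qa
instance (qa : List (String × List (String × List (String × String)))) (out : List (String × List String)) : Decidable (Spec_mapAnswersToQuestions qa out) := by unfold Spec_mapAnswersToQuestions; infer_instance

-- ===== CLAIM (what is proved, stated in full; the proofs are below) =====
def Claim_equal_mapAnswersToQuestions : Prop := ∀ (qa : List (String × List (String × List (String × String)))), Dom_mapAnswersToQuestions qa → Pre_mapAnswersToQuestions qa → Spec_mapAnswersToQuestions qa (mapAnswersToQuestions qa)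

-- ===== LEMMAS AND PROOFS =====

-- A's loop body, written with the branch, is exactly `modify`.
theorem groupStep (m : PySem.Dict String (List String)) (c v : String) :
    (if m.contains c = false then m.insert c [v]
     else m.modify c [] (fun l => l ++ [v]))
      = m.modify c [] (fun l => l ++ [v]) := by
  by_cases h : m.contains c = true
  · simp [h]
  · simp only [Bool.not_eq_true] at h
    simp [h, PySem.Dict.modify, PySem.Dict.getD_of_not_contains m [] h]

-- Characterisation of A's whole grouping loop over keys `ks` (key/id extracted by `key`/`idv`).
theorem groupLoop (ks : List String) (key idv : String → String) :
    ((ks.foldl (fun (m : PySem.Dict String (List String)) k =>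
        if m.contains (key k) = false then m.insert (key k) [idv k]
        else m.modify (key k) [] (fun l => l ++ [idv k])) PySem.Dict.empty).items)
      = (PySem.Set.ofList (ks.map key)).map
          (fun c => (c, (ks.filter (fun k => key k == c)).map idv)) := by
  have hfold :
      (ks.foldl (fun (m : PySem.Dict String (List String)) k =>
        if m.contains (key k) = false then m.insert (key k) [idv k]
        else m.modify (key k) [] (fun l => l ++ [idv k])) PySem.Dict.empty)
      = ((ks.map (fun k => (key k, idv k))).foldl
          (fun (m : PySem.Dict String (List String)) p =>
            m.modify p.1 [] (fun l => l ++ [p.2])) PySem.Dict.empty) := by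
    rw [List.foldl_map]
    simp only [groupStep]
  rw [hfold]
  have hnd : ((ks.map (fun k => (key k, idv k))).foldl
      (fun (m : PySem.Dict String (List String)) p =>
        m.modify p.1 [] (fun l => l ++ [p.2])) PySem.Dict.empty).keys.Nodup := by
    exact PySem.Dict.nodup_keys_foldl_modify_key _ (fun p => p.1) []
      (fun (_ : PySem.Dict String (List String)) (p : String × String) => (fun l => l ++ [p.2])) _ (by simp)
  rw [PySem.Dict.items_eq_map_keys _ hnd []]
  have hkeys : ((ks.map (fun k => (key k, idv k))).foldl
      (fun (m : PySem.Dict String (List String)) p =>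
        m.modify p.1 [] (fun l => l ++ [p.2])) PySem.Dict.empty).keys
      = PySem.Set.ofList (ks.map key) := by
    rw [PySem.Dict.keys_foldl_modify_key _ (fun p => p.1) []
      (fun (_ : PySem.Dict String (List String)) (p : String × String) => (fun l => l ++ [p.2]))]
    simp [PySem.Set.update_nil_left, List.map_map, Function.comp_def]
  rw [hkeys]
  refine List.map_congr_left (fun c _ => ?_)
  rw [PySem.Dict.getD_foldl_modify_append]
  simp [List.filter_map, List.map_map, Function.comp_def]

-- ===== VERDICT (by name: the statement is the Claim_ definition above) =====
theorem mapAnswersToQuestions_spec : Claim_equal_mapAnswersToQuestions := by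
  intro qa _ _
  unfold Spec_mapAnswersToQuestions mapAnswersToQuestions mapAnswersToQuestions_alt
  set ad : PySem.Dict String (List (String × String)) :=
    PySem.Dict.ofList ((PySem.Dict.ofList qa).getD "answers" []) with had
  rw [groupLoop ad.keys
    (fun k => (PySem.Dict.ofList (ad.getD k [])).getD "ParentId" "")
    (fun k => (PySem.Dict.ofList (ad.getD k [])).getD "Id" "")]
  have hvals : ad.values = ad.keys.map (fun k => ad.getD k []) :=
    PySem.Dict.values_eq_map_keys ad (by rw [had]; exact PySem.Dict.nodup_keys_ofList _) []
  rw [hvals]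
  simp [PySem.List.dedup, List.map_map, List.filter_map, Function.comp_def]
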